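-- pv_equiv track=rewrite | github.com/harryjhnam/CodingInterview | CodeSignal/Trees_Basic/findSubstrings.py | solution
-- ===== SOURCE A (Python) =====
-- class Trie():
--     def __init__(self, s):
--         self.letter = s
--         self.is_terminal = False
--         self.children = {}
--
-- def append_Trie(root, part):
--     cur = root
--     for s in part:
--         if s not in cur.children:
--             cur.children[s] = Trie(s)
--         cur = cur.children[s]
--     cur.is_terminal = True
--     return root
--
-- def find_part(word, root):
--     start_pos = 0
--     max_len = 0
--
--     for start_i in range(len(word)):
--         cur = root
--         for i in range(start_i, len(word)):
--             s = word[i]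
--             if s not in cur.children:
--                 break
--             cur = cur.children[s]
--
--             length = i - start_i + 1
--             if cur.is_terminal and length > max_len:
--                 max_len = length
--                 start_pos = start_i
--
--     if max_len > 0:
--         end_pos = start_pos + max_len
--         return word[:start_pos]+'['+word[start_pos:end_pos]+']'+word[end_pos:]
--
--     return word
--
-- def solution(words, parts):
--
--     root = Trie('')
--     for part in parts:
--         root = append_Trie(root, part)
--
--     res = []
--     for word in words:
--         res.append(find_part(word, root))
--
--     return res
-- ===== SOURCE B (Python) =====
-- def solution(words, parts):
--     ps = set(parts)
--     lens = sorted({len(p) for p in parts if p}, reverse=True)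
--     res = []
--     for w in words:
--         out = w
--         for L in lens:
--             hit = None
--             for i in range(len(w) + 1 - L):
--                 if w[i:i+L] in ps:
--                     hit = i
--                     break
--             if hit is not None:
--                 out = w[:hit] + '[' + w[hit:hit+L] + ']' + w[hit+L:]
--                 break
--         res.append(out)
--     return res
-- ===== Notes on version B (the rewrite author's own statement) =====
-- stated objective: alternative
-- what changed: Replaces the hand-built trie plus per-start longest-walk with a hash set of parts scanned by distinct part lengths in decreasing order, returning at the first (longest, leftmost) window hit.
import Mathlib
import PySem

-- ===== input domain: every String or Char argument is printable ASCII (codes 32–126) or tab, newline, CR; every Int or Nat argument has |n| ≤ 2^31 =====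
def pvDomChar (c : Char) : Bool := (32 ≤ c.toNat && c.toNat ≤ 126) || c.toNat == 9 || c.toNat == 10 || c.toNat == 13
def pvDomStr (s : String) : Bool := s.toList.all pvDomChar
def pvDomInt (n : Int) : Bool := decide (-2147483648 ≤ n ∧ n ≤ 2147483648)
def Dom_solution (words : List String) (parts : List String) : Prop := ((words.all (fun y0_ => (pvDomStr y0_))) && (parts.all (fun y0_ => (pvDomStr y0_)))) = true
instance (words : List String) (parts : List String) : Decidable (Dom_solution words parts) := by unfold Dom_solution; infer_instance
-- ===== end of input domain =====

-- B replaces A's hand-built trie and per-start longest-walk with a set of parts scanned by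
-- distinct part lengths in decreasing order (first hit = longest, leftmost); a timing run
-- measured B faster by a constant factor.

-- ===== PORT A =====
-- Python's Trie class: the 'letter' field is stored but never read, so the port keeps only
-- is_terminal and the children dict (an insertion-ordered assoc structure, like Python's dict).
mutual
inductive PTrie : Type
  | mk : Bool → PChildren → PTrie
inductive PChildren : Type
  | nil : PChildren
  | cons : Char → PTrie → PChildren → PChildren
end

def PTrie.term : PTrie → Bool
  | .mk b _ => b

def PTrie.ch : PTrie → PChildren
  | .mk _ c => c

-- dict lookup: first (unique) matching key
def PChildren.find? : PChildren → Char → Option PTrie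
  | .nil, _ => none
  | .cons c t r, d => if c = d then some t else r.find? d

-- dict assignment: overwrite in place, new keys appended (Python dict insertion order)
def PChildren.set : PChildren → Char → PTrie → PChildren
  | .nil, d, u => .cons d u .nil
  | .cons c t r, d, u => if c = d then .cons c u r else .cons c t (r.set d u)

-- append_Trie: walk/create the path for 'part', mark the last node terminal
def appendTrie : PTrie → List Char → PTrie
  | .mk _ ch, [] => .mk true ch
  | .mk b ch, c :: rest =>
    let child := match ch.find? c with
      | some u => u
      | none => .mk false .nil          -- Trie(s)
    .mk b (ch.set c (appendTrie child rest))

-- the inner 'for i in range(start_i, len(word))' loop of find_part, with its break;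
-- state st = (start_pos, max_len), k = number of chars consumed so far from start_i
def innerLoop : PTrie → List Char → Nat → Nat → Nat × Nat → Nat × Nat
  | _, [], _, _, st => st
  | cur, c :: rest, start_i, k, st =>
    match cur.ch.find? c with
    | none => st                        -- break
    | some cur' =>
      let length := k + 1
      let st' := if cur'.term = true ∧ st.2 < length then (start_i, length) else st
      innerLoop cur' rest start_i length st'

def findPart (word : String) (root : PTrie) : String :=
  let w := word.toList
  let st := (List.range w.length).foldl (fun st start_i => innerLoop root (w.drop start_i) start_i 0 st) (0, 0)
  if 0 < st.2 then
    String.ofList (w.take st.1 ++ '[' :: ((w.drop st.1).take st.2 ++ ']' :: w.drop (st.1 + st.2)))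
  else word

def solution (words : List String) (parts : List String) : List String :=
  let root := parts.foldl (fun r p => appendTrie r p.toList) (.mk false .nil)
  words.map (fun word => findPart word root)

-- ===== PORT B =====
-- lens = sorted({len(p) for p in parts if p}, reverse=True)
def altLens (parts : List String) : List Nat :=
  PySem.List.sorted (PySem.Set.ofList ((parts.filter (fun p => p ≠ "")).map (fun p => p.toList.length))) (fun x => x) true

-- the per-word body of B: first length (longest first), first start, with the breaks
-- ported as find?/findSome?
def altFind (ps : PySem.Set String) (lens : List Nat) (w : String) : String :=
  let wl := w.toList
  match lens.findSome? (fun L =>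
      ((List.range (wl.length + 1 - L)).find?
          (fun i => PySem.Set.contains ps (String.ofList ((wl.drop i).take L)))).map (fun i => (L, i))) with
  | some (L, i) => String.ofList (wl.take i ++ '[' :: ((wl.drop i).take L ++ ']' :: wl.drop (i + L)))
  | none => w

def solution_alt (words : List String) (parts : List String) : List String :=
  words.map (altFind (PySem.Set.ofList parts) (altLens parts))

-- ===== PRECONDITION & SPEC =====
def Spec_solution (words : List String) (parts : List String) (out : List String) : Prop := out = solution_alt words parts
instance (words : List String) (parts : List String) (out : List String) : Decidable (Spec_solution words parts out) := by unfold Spec_solution; infer_instance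

-- ===== CLAIM (what is proved, stated in full; the proofs are below) =====
def Claim_equal_solution : Prop := ∀ (words : List String) (parts : List String), Dom_solution words parts → Spec_solution words parts (solution words parts)

-- ===== LEMMAS AND PROOFS =====

-- 'Hit parts w i L' : parts contains the length-L substring of w starting at i
def Hit (parts : List String) (w : List Char) (i L : Nat) : Prop :=
  1 ≤ L ∧ i + L ≤ w.length ∧ String.ofList ((w.drop i).take L) ∈ parts

-- the (longest, then leftmost) hit
def Best (parts : List String) (w : List Char) (L i : Nat) : Prop :=
  Hit parts w i L ∧ (∀ i' L', Hit parts w i' L' → L' ≤ L) ∧ (∀ i', Hit parts w i' L → i ≤ i')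

-- walking the trie along s: is the node reached terminal?
def walkTerm : PTrie → List Char → Bool
  | t, [] => t.term
  | t, c :: r =>
    match t.ch.find? c with
    | none => false
    | some u => walkTerm u r

theorem find?_set : ∀ (ch : PChildren) (c d : Char) (u : PTrie),
    (ch.set c u).find? d = if c = d then some u else ch.find? d
  | .nil, c, d, u => by
      simp only [PChildren.set, PChildren.find?]
  | .cons c' t r, c, d, u => by
      simp only [PChildren.set]
      by_cases h : c' = c
      · subst h
        by_cases h2 : c' = d <;> simp [PChildren.find?, h2]
      · simp only [if_neg h, PChildren.find?]
        by_cases h2 : c' = d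
        · subst h2
          have : ¬ (c = c') := fun hh => h hh.symm
          simp [this]
        · simp [h2, find?_set r c d u]

theorem walkTerm_empty (r : List Char) : walkTerm (.mk false .nil) r = false := by
  cases r <;> simp [walkTerm, PTrie.term, PTrie.ch, PChildren.find?]

theorem walkTerm_append : ∀ (p : List Char) (t : PTrie) (s : List Char),
    walkTerm (appendTrie t p) s = (decide (s = p) || walkTerm t s)
  | [], .mk b ch, s => by
      cases s with
      | nil => simp [appendTrie, walkTerm, PTrie.term]
      | cons d r => simp [appendTrie, walkTerm, PTrie.ch]
  | c :: rest, .mk b ch, s => by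
      cases s with
      | nil => simp [appendTrie, walkTerm, PTrie.term]
      | cons d r =>
        simp only [appendTrie, walkTerm, PTrie.ch, find?_set]
        by_cases h : c = d
        · subst h
          cases hf : ch.find? c with
          | some u =>
            simp [walkTerm_append rest u r]
          | none =>
            simp [walkTerm_append rest (.mk false .nil) r, walkTerm_empty]
        · have hne : ¬ (d :: r = c :: rest) := by
            intro hh; exact h (List.cons.inj hh).1.symm
          simp only [decide_eq_false hne, Bool.false_or, h, if_false]

theorem walkTerm_foldl (parts : List String) : ∀ (t : PTrie) (s : List Char),
    walkTerm (parts.foldl (fun r p => appendTrie r p.toList) t) s = true ↔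
      (∃ p ∈ parts, p.toList = s) ∨ walkTerm t s = true := by
  induction parts with
  | nil => simp
  | cons q qs ih =>
    intro t s
    simp only [List.foldl_cons, ih, walkTerm_append, Bool.or_eq_true, decide_eq_true_eq]
    constructor
    · rintro (⟨p, hp, he⟩ | h | h)
      · exact Or.inl ⟨p, List.mem_cons_of_mem _ hp, he⟩
      · exact Or.inl ⟨q, List.mem_cons_self, h.symm⟩
      · exact Or.inr h
    · rintro (⟨p, hp, he⟩ | h)
      · rcases List.mem_cons.mp hp with rfl | hp
        · exact Or.inr (Or.inl he.symm)
        · exact Or.inl ⟨p, hp, he⟩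
      · exact Or.inr (Or.inr h)

theorem walkTerm_build (parts : List String) (s : List Char) :
    walkTerm (parts.foldl (fun r p => appendTrie r p.toList) (.mk false .nil)) s = true ↔
      String.ofList s ∈ parts := by
  rw [walkTerm_foldl, walkTerm_empty]
  simp only [Bool.false_eq_true, or_false]
  constructor
  · rintro ⟨p, hp, rfl⟩; rw [String.ofList_toList]; exact hp
  · intro h; exact ⟨_, h, String.toList_ofList⟩

def bestLen : PTrie → List Char → Nat
  | _, [] => 0
  | cur, c :: rest =>
    match cur.ch.find? c with
    | none => 0
    | some cur' =>
      let m := bestLen cur' rest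
      if 0 < m then m + 1 else if cur'.term then 1 else 0

theorem bestLen_le : ∀ (cur : PTrie) (rem : List Char), bestLen cur rem ≤ rem.length
  | _, [] => by simp [bestLen]
  | cur, c :: rest => by
    simp only [bestLen, List.length_cons]
    cases hf : cur.ch.find? c with
    | none => simp only; omega
    | some cur' =>
      have := bestLen_le cur' rest
      simp only
      split_ifs <;> omega

theorem walkTerm_bestLen : ∀ (cur : PTrie) (rem : List Char), 0 < bestLen cur rem →
    walkTerm cur (rem.take (bestLen cur rem)) = true
  | cur, [], h => by simp [bestLen] at h
  | .mk b ch, c :: rest, h => by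
    simp only [bestLen, PTrie.ch] at h ⊢
    cases hf : ch.find? c with
    | none => rw [hf] at h; simp at h
    | some cur' =>
      rw [hf] at h
      dsimp only at h ⊢
      by_cases hm : 0 < bestLen cur' rest
      · have ih := walkTerm_bestLen cur' rest hm
        simp only [if_pos hm, List.take_succ_cons, walkTerm, PTrie.ch, hf]
        exact ih
      · simp only [if_neg hm] at h ⊢
        by_cases ht : cur'.term
        · simp [ht, List.take_succ_cons, walkTerm, PTrie.ch, hf]
        · simp [ht] at h

theorem le_bestLen : ∀ (cur : PTrie) (rem : List Char) (L : Nat), 1 ≤ L → L ≤ rem.length →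
    walkTerm cur (rem.take L) = true → L ≤ bestLen cur rem
  | cur, [], L, h1, h2, _ => by simp at h2; omega
  | .mk b ch, c :: rest, L, h1, h2, h => by
    obtain ⟨l, rfl⟩ : ∃ l, L = l + 1 := ⟨L - 1, by omega⟩
    simp only [List.take_succ_cons, walkTerm, PTrie.ch] at h
    cases hf : ch.find? c with
    | none => rw [hf] at h; simp at h
    | some cur' =>
      rw [hf] at h
      dsimp only at h
      simp only [bestLen, PTrie.ch, hf]
      rcases Nat.eq_zero_or_pos l with rfl | hl
      · simp only [List.take_zero, walkTerm] at h
        split_ifs <;> simp_all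
      · have ih := le_bestLen cur' rest l hl (by simp at h2; omega) h
        split_ifs <;> omega

theorem innerLoop_eq : ∀ (rem : List Char) (cur : PTrie) (si k sp ml : Nat),
    innerLoop cur rem si k (sp, ml) =
      (if ml < k + bestLen cur rem ∧ 0 < bestLen cur rem then (si, k + bestLen cur rem) else (sp, ml))
  | [], cur, si, k, sp, ml => by simp [innerLoop, bestLen]
  | c :: rest, .mk b ch, si, k, sp, ml => by
    simp only [innerLoop, bestLen, PTrie.ch]
    cases hf : ch.find? c with
    | none => simp
    | some cur' =>
      dsimp only
      by_cases hP : cur'.term = true ∧ ml < k + 1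
      · rw [if_pos hP, innerLoop_eq rest cur' si (k+1) si (k+1)]
        obtain ⟨ht, hup⟩ := hP
        split_ifs with h1 h2 h3 <;>
          simp_all [Prod.mk.injEq] <;> omega
      · rw [if_neg hP, innerLoop_eq rest cur' si (k+1) sp ml]
        by_cases ht : cur'.term = true <;>
          [skip; skip] <;>
          split_ifs with h1 h2 h3 <;>
          simp_all [Prod.mk.injEq] <;> omega

theorem outer_inv (f : Nat → Nat) : ∀ (n : Nat),
    (∀ i, i < n → f i ≤ ((List.range n).foldl (fun st i => if st.2 < f i ∧ 0 < f i then (i, f i) else st) (0, 0)).2) ∧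
    (((List.range n).foldl (fun st i => if st.2 < f i ∧ 0 < f i then (i, f i) else st) (0, 0)).2 = 0 →
      ((List.range n).foldl (fun st i => if st.2 < f i ∧ 0 < f i then (i, f i) else st) (0, 0)) = (0, 0)) ∧
    (0 < ((List.range n).foldl (fun st i => if st.2 < f i ∧ 0 < f i then (i, f i) else st) (0, 0)).2 →
      (((List.range n).foldl (fun st i => if st.2 < f i ∧ 0 < f i then (i, f i) else st) (0, 0)).1 < n ∧
       f ((List.range n).foldl (fun st i => if st.2 < f i ∧ 0 < f i then (i, f i) else st) (0, 0)).1 =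
         ((List.range n).foldl (fun st i => if st.2 < f i ∧ 0 < f i then (i, f i) else st) (0, 0)).2 ∧
       ∀ j, j < ((List.range n).foldl (fun st i => if st.2 < f i ∧ 0 < f i then (i, f i) else st) (0, 0)).1 →
         f j < ((List.range n).foldl (fun st i => if st.2 < f i ∧ 0 < f i then (i, f i) else st) (0, 0)).2)) := by
  intro n
  induction n with
  | zero => simp
  | succ m ih =>
    obtain ⟨ih1, ih2, ih3⟩ := ih
    rw [List.range_succ, List.foldl_append, List.foldl_cons, List.foldl_nil]
    set r := (List.range m).foldl (fun st i => if st.2 < f i ∧ 0 < f i then (i, f i) else st) (0, 0) with hr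
    by_cases hc : r.2 < f m ∧ 0 < f m
    · rw [if_pos hc]
      refine ⟨?_, by simp; omega, ?_⟩
      · intro i hi
        rcases Nat.lt_succ_iff_lt_or_eq.mp hi with h | rfl
        · exact le_trans (ih1 i h) (by simp; omega)
        · simp
      · intro _
        refine ⟨by simp, by simp, ?_⟩
        intro j hj
        simp only at hj ⊢
        exact lt_of_le_of_lt (ih1 j hj) hc.1
    · rw [if_neg hc]
      refine ⟨?_, ih2, ?_⟩
      · intro i hi
        rcases Nat.lt_succ_iff_lt_or_eq.mp hi with h | rfl
        · exact ih1 i h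
        · omega
      · intro hpos
        obtain ⟨a, b, c⟩ := ih3 hpos
        exact ⟨by omega, b, c⟩

def rootOf (parts : List String) : PTrie :=
  parts.foldl (fun r p => appendTrie r p.toList) (.mk false .nil)

theorem hit_walk (parts : List String) (w : List Char) (i L : Nat) :
    Hit parts w i L ↔ 1 ≤ L ∧ i + L ≤ w.length ∧ walkTerm (rootOf parts) ((w.drop i).take L) = true := by
  unfold Hit rootOf
  rw [walkTerm_build]

theorem bestLen_hit (parts : List String) (w : List Char) (i : Nat)
    (h : 0 < bestLen (rootOf parts) (w.drop i)) :
    Hit parts w i (bestLen (rootOf parts) (w.drop i)) := by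
  rw [hit_walk]
  have hle := bestLen_le (rootOf parts) (w.drop i)
  rw [List.length_drop] at hle
  have hi : i < w.length := by
    by_contra hc
    have : w.drop i = [] := List.drop_eq_nil_of_le (by omega)
    rw [this] at h
    simp [bestLen] at h
  exact ⟨h, by omega, walkTerm_bestLen _ _ h⟩

theorem hit_le_bestLen (parts : List String) (w : List Char) (i L : Nat)
    (h : Hit parts w i L) : L ≤ bestLen (rootOf parts) (w.drop i) := by
  rw [hit_walk] at h
  exact le_bestLen _ _ L h.1 (by rw [List.length_drop]; omega) h.2.2

theorem findPart_char (parts : List String) (word : String) :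
    ((¬ ∃ i L, Hit parts word.toList i L) → findPart word (rootOf parts) = word) ∧
    (∀ L0 i0, Best parts word.toList L0 i0 →
      findPart word (rootOf parts) =
        String.ofList (word.toList.take i0 ++ '[' ::
          ((word.toList.drop i0).take L0 ++ ']' :: word.toList.drop (i0 + L0)))) := by
  set w := word.toList with hw
  set f : Nat → Nat := fun i => bestLen (rootOf parts) (w.drop i) with hf
  have hstep : (fun (st : Nat × Nat) (start_i : Nat) => innerLoop (rootOf parts) (w.drop start_i) start_i 0 st) =
      (fun (st : Nat × Nat) (i : Nat) => if st.2 < f i ∧ 0 < f i then (i, f i) else st) := by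
    funext st si
    have := innerLoop_eq (w.drop si) (rootOf parts) si 0 st.1 st.2
    simpa using this
  have hinv := outer_inv f w.length
  have hdef : findPart word (rootOf parts) =
      (if 0 < ((List.range w.length).foldl (fun st i => if st.2 < f i ∧ 0 < f i then (i, f i) else st) (0, 0)).2 then
        String.ofList (w.take ((List.range w.length).foldl (fun st i => if st.2 < f i ∧ 0 < f i then (i, f i) else st) (0, 0)).1 ++ '[' ::
          ((w.drop ((List.range w.length).foldl (fun st i => if st.2 < f i ∧ 0 < f i then (i, f i) else st) (0, 0)).1).take
              ((List.range w.length).foldl (fun st i => if st.2 < f i ∧ 0 < f i then (i, f i) else st) (0, 0)).2 ++ ']' ::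
            w.drop (((List.range w.length).foldl (fun st i => if st.2 < f i ∧ 0 < f i then (i, f i) else st) (0, 0)).1 +
              ((List.range w.length).foldl (fun st i => if st.2 < f i ∧ 0 < f i then (i, f i) else st) (0, 0)).2)))
      else word) := by
    rw [← hstep]; rfl
  rw [hdef]
  set r := (List.range w.length).foldl (fun st i => if st.2 < f i ∧ 0 < f i then (i, f i) else st) (0, 0) with hr
  obtain ⟨inv1, inv2, inv3⟩ := hinv
  constructor
  · intro hno
    have hz : r.2 = 0 := by
      by_contra hc
      have hpos : 0 < r.2 := Nat.pos_of_ne_zero hc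
      obtain ⟨_, hfr, _⟩ := inv3 hpos
      exact hno ⟨r.1, r.2, by rw [← hfr]; exact bestLen_hit parts w r.1 (by show 0 < f r.1; omega)⟩
    simp [hz]
  · intro L0 i0 hbest
    obtain ⟨hhit, hmax, hmin⟩ := hbest
    have hi0 : i0 < w.length := by
      obtain ⟨h1, h2, _⟩ := hhit; omega
    have hpos : 0 < r.2 := by
      by_contra hc
      have hz : r.2 = 0 := by omega
      have := inv1 i0 hi0
      have hL0 : L0 ≤ f i0 := hit_le_bestLen parts w i0 L0 hhit
      obtain ⟨h1, _, _⟩ := hhit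
      omega
    obtain ⟨hrn, hfr, hleft⟩ := inv3 hpos
    have hhit' : Hit parts w r.1 r.2 := by
      rw [← hfr]; exact bestLen_hit parts w r.1 (by show 0 < f r.1; omega)
    have hle1 : r.2 ≤ L0 := hmax r.1 r.2 hhit'
    have hle2 : L0 ≤ r.2 := le_trans (hit_le_bestLen parts w i0 L0 hhit) (inv1 i0 hi0)
    have hLeq : r.2 = L0 := by omega
    have hieq : r.1 = i0 := by
      have h1 : i0 ≤ r.1 := hmin r.1 (hLeq ▸ hhit')
      rcases Nat.lt_or_ge i0 r.1 with hlt | hge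
      · exfalso
        have := hleft i0 hlt
        have hL0 : L0 ≤ f i0 := hit_le_bestLen parts w i0 L0 hhit
        omega
      · omega
    rw [if_pos hpos, hieq, hLeq]

theorem find?_range'_least (p : Nat → Bool) : ∀ (m s i0 : Nat), s ≤ i0 → i0 < s + m →
    p i0 = true → (∀ j, s ≤ j → j < i0 → p j = false) →
    (List.range' s m).find? p = some i0
  | 0, s, i0, h1, h2, _, _ => by omega
  | m + 1, s, i0, h1, h2, hp, hmin => by
    rw [List.range'_succ, List.find?_cons]
    rcases Nat.eq_or_lt_of_le h1 with rfl | hlt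
    · simp [hp]
    · rw [hmin s (le_refl s) hlt]
      exact find?_range'_least p m (s + 1) i0 hlt (by omega) hp (fun j ha hb => hmin j (by omega) hb)

theorem find?_range_least (p : Nat → Bool) (n i0 : Nat) (h2 : i0 < n)
    (hp : p i0 = true) (hmin : ∀ j, j < i0 → p j = false) :
    (List.range n).find? p = some i0 := by
  rw [List.range_eq_range']
  exact find?_range'_least p n 0 i0 (Nat.zero_le _) (by omega) hp (fun j _ hj => hmin j hj)

theorem mem_altLens (parts : List String) (L : Nat) :
    L ∈ altLens parts ↔ ∃ p ∈ parts, p ≠ "" ∧ p.toList.length = L := by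
  unfold altLens
  rw [PySem.List.mem_sorted, PySem.Set.mem_ofList]
  simp only [List.mem_map, List.mem_filter]
  constructor
  · rintro ⟨p, ⟨hp, hne⟩, rfl⟩
    exact ⟨p, hp, by simpa using hne, rfl⟩
  · rintro ⟨p, hp, hne, rfl⟩
    exact ⟨p, ⟨hp, by simpa using hne⟩, rfl⟩

theorem altLens_one_le (parts : List String) (L : Nat) (h : L ∈ altLens parts) : 1 ≤ L := by
  rw [mem_altLens] at h
  obtain ⟨p, _, hne, rfl⟩ := h
  have : p.toList ≠ [] := by
    intro hc
    apply hne
    have := congrArg String.ofList hc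
    rwa [String.ofList_toList] at this
  cases hh : p.toList with
  | nil => exact absurd hh this
  | cons a l => simp

theorem altLens_pairwise_gt (parts : List String) : (altLens parts).Pairwise (· > ·) := by
  have h1 : (altLens parts).Pairwise (fun a b => b ≤ a) := by
    have := PySem.List.sorted_pairwise_rev
      (PySem.Set.ofList ((parts.filter (fun p => p ≠ "")).map (fun p => p.toList.length))) (fun x => x)
    simpa [altLens] using this
  have h2 : (altLens parts).Nodup := by
    have hperm : (altLens parts).Perm (PySem.Set.ofList ((parts.filter (fun p => p ≠ "")).map (fun p => p.toList.length))) :=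
      PySem.List.sorted_perm _ _ _
    exact hperm.nodup_iff.mpr (PySem.Set.nodup_ofList _)
  have := List.Pairwise.and h1 h2
  exact this.imp (fun {a b} hab => by omega)

theorem contains_ofList_iff (xs : List String) (x : String) :
    PySem.Set.contains (PySem.Set.ofList xs) x = true ↔ x ∈ xs := by
  rw [PySem.Set.contains_iff, PySem.Set.mem_ofList]

theorem altFind_char (parts : List String) (word : String) :
    ((¬ ∃ i L, Hit parts word.toList i L) →
      altFind (PySem.Set.ofList parts) (altLens parts) word = word) ∧
    (∀ L0 i0, Best parts word.toList L0 i0 →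
      altFind (PySem.Set.ofList parts) (altLens parts) word =
        String.ofList (word.toList.take i0 ++ '[' ::
          ((word.toList.drop i0).take L0 ++ ']' :: word.toList.drop (i0 + L0)))) := by
  set w := word.toList with hw
  set g : Nat → Option (Nat × Nat) := fun L =>
    ((List.range (w.length + 1 - L)).find?
        (fun i => PySem.Set.contains (PySem.Set.ofList parts) (String.ofList ((w.drop i).take L)))).map
      (fun i => (L, i)) with hg
  have hgdef : altFind (PySem.Set.ofList parts) (altLens parts) word =
      (match (altLens parts).findSome? g with
       | some (L, i) => String.ofList (w.take i ++ '[' :: ((w.drop i).take L ++ ']' :: w.drop (i + L)))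
       | none => word) := rfl
  have hhit_of : ∀ L i, L ∈ altLens parts → i < w.length + 1 - L →
      PySem.Set.contains (PySem.Set.ofList parts) (String.ofList ((w.drop i).take L)) = true →
      Hit parts w i L := by
    intro L i hL hi hc
    have h1 := altLens_one_le parts L hL
    exact ⟨h1, by omega, (contains_ofList_iff parts _).mp hc⟩
  have hgnone : ∀ L, L ∈ altLens parts → (∀ i, ¬ Hit parts w i L) → g L = none := by
    intro L hL hno
    show Option.map (fun i => (L, i)) ((List.range (w.length + 1 - L)).find?
        (fun i => PySem.Set.contains (PySem.Set.ofList parts) (String.ofList ((w.drop i).take L)))) = none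
    have : (List.range (w.length + 1 - L)).find?
        (fun i => PySem.Set.contains (PySem.Set.ofList parts) (String.ofList ((w.drop i).take L))) = none := by
      apply List.find?_eq_none.mpr
      intro i hi hc
      exact hno i (hhit_of L i hL (List.mem_range.mp hi) hc)
    rw [this]; rfl
  constructor
  · intro hno
    rw [hgdef, List.findSome?_eq_none_iff.mpr]
    intro L hL
    exact hgnone L hL (fun i hi => hno ⟨i, L, hi⟩)
  · intro L0 i0 hbest
    obtain ⟨hhit, hmax, hmin⟩ := hbest
    obtain ⟨h1, h2, h3⟩ := hhit
    have hmem : L0 ∈ altLens parts := by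
      rw [mem_altLens]
      refine ⟨String.ofList ((w.drop i0).take L0), h3, ?_, ?_⟩
      · intro hc
        have := congrArg String.toList hc
        rw [String.toList_ofList] at this
        have hlen := congrArg List.length this
        simp [List.length_take, List.length_drop] at hlen
        omega
      · rw [String.toList_ofList]
        simp [List.length_take, List.length_drop]
        omega
    obtain ⟨s, t, hsplit⟩ := List.append_of_mem hmem
    have hpw := altLens_pairwise_gt parts
    rw [hsplit] at hpw
    have hgt : ∀ x ∈ s, x > L0 :=
      fun x hx => (List.pairwise_append.mp hpw).2.2 x hx L0 List.mem_cons_self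
    rw [hgdef, hsplit, List.findSome?_append]
    have hpre : s.findSome? g = none := by
      apply List.findSome?_eq_none_iff.mpr
      intro L hL
      apply hgnone L (hsplit ▸ List.mem_append_left _ hL)
      intro i hi
      exact absurd (hmax i L hi) (by have := hgt L hL; omega)
    rw [hpre]
    have hgL0 : g L0 = some (L0, i0) := by
      show Option.map (fun i => (L0, i)) ((List.range (w.length + 1 - L0)).find?
          (fun i => PySem.Set.contains (PySem.Set.ofList parts) (String.ofList ((w.drop i).take L0)))) = some (L0, i0)
      have : (List.range (w.length + 1 - L0)).find?
          (fun i => PySem.Set.contains (PySem.Set.ofList parts) (String.ofList ((w.drop i).take L0))) = some i0 := by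
        apply find?_range_least _ _ _ (by omega)
        · exact (contains_ofList_iff parts _).mpr h3
        · intro j hj
          rw [Bool.eq_false_iff]
          intro hc
          have : Hit parts w j L0 := ⟨h1, by omega, (contains_ofList_iff parts _).mp hc⟩
          exact absurd (hmin j this) (by omega)
      rw [this]; rfl
    simp [hgL0]

theorem exists_best (parts : List String) (w : List Char) (h : ∃ i L, Hit parts w i L) :
    ∃ L0 i0, Best parts w L0 i0 := by
  haveI : DecidablePred (fun L => ∃ i, Hit parts w i L) := fun _ => Classical.propDecidable _
  obtain ⟨i1, L1, hhit1⟩ := h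
  have hL1n : L1 ≤ w.length := by
    obtain ⟨_, h2, _⟩ := hhit1; omega
  set L0 := Nat.findGreatest (fun L => ∃ i, Hit parts w i L) w.length with hL0
  have hex0 : ∃ i, Hit parts w i L0 :=
    Nat.findGreatest_spec (P := fun L => ∃ i, Hit parts w i L) hL1n ⟨i1, hhit1⟩
  haveI : DecidablePred (fun i => Hit parts w i L0) := fun _ => Classical.propDecidable _
  refine ⟨L0, Nat.find hex0, Nat.find_spec hex0, ?_, ?_⟩
  · intro i' L' hh
    have : L' ≤ w.length := by obtain ⟨_, h2, _⟩ := hh; omega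
    exact Nat.le_findGreatest this ⟨i', hh⟩
  · intro i' hh
    exact Nat.find_min' hex0 hh

-- ===== VERDICT (by name: the statement is the Claim_ definition above) =====
theorem solution_spec : Claim_equal_solution := by
  intro words parts _
  unfold Spec_solution
  show words.map (fun word => findPart word (rootOf parts)) =
    words.map (altFind (PySem.Set.ofList parts) (altLens parts))
  apply List.map_congr_left
  intro word _
  by_cases hex : ∃ i L, Hit parts word.toList i L
  · obtain ⟨L0, i0, hbest⟩ := exists_best parts word.toList hex
    rw [(findPart_char parts word).2 L0 i0 hbest, (altFind_char parts word).2 L0 i0 hbest]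
  · rw [(findPart_char parts word).1 hex, (altFind_char parts word).1 hex]
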